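-- pv_equiv track=rewrite | github.com/petteriTeikari/deep-biblio-tools | scripts/check_no_regex_parsing.py | is_near_structured_format
-- ===== SOURCE A (Python) =====
-- STRUCTURED_FORMATS = {
--     "markdown": ["md", "markdown"],
--     "latex": ["tex", "latex", "LaTeX"],
--     "bibtex": ["bib", "bibtex", "BibTeX"],
--     "xml": ["xml", "XML"],
--     "json": ["json", "JSON"],
--     "yaml": ["yaml", "yml"],
-- }
--
-- def is_near_structured_format(content: str, line_no: int) -> bool:
--     """Check if a line number is near structured format handling."""
--     lines = content.splitlines()
--     context_range = 10  # Look within 10 lines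
--
--     start = max(0, line_no - context_range - 1)
--     end = min(len(lines), line_no + context_range)
--
--     for i in range(start, end):
--         line_lower = lines[i].lower()
--         for keywords in STRUCTURED_FORMATS.values():
--             if any(keyword in line_lower for keyword in keywords):
--                 return True
--
--     return False
-- ===== SOURCE B (Python) =====
-- # Scan every line once, mark "structured" lines via a minimal keyword tuple
-- # (keywords subsumed by a shorter one, or containing uppercase letters that a
-- # lowercased line can never contain, are dropped), then test whether any
-- # marked line index falls in the raw window [line_no-11, line_no+10).
-- KEYWORDS = ("md", "markdown", "tex", "bib", "xml", "json", "yaml", "yml")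
--
-- def is_near_structured_format(content: str, line_no: int) -> bool:
--     """Check if a line number is near structured format handling."""
--     lo, hi = line_no - 11, line_no + 10
--     return any(lo <= i < hi
--                for i, line in enumerate(content.splitlines())
--                if any(kw in line.lower() for kw in KEYWORDS))
-- ===== Notes on version B (the rewrite author's own statement) =====
-- stated objective: alternative
-- what changed: B replaces A's clamped index loop over the +/-10-line window with a single enumerate pass over ALL lines that marks 'structured' lines using a minimal keyword tuple (subsumed keywords like 'latex'/'bibtex' and never-matching uppercase keywords like 'LaTeX'/'XML' dropped), then returns whether any marked line index lies in the raw interval [line_no-11, line_no+10).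
import Mathlib
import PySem

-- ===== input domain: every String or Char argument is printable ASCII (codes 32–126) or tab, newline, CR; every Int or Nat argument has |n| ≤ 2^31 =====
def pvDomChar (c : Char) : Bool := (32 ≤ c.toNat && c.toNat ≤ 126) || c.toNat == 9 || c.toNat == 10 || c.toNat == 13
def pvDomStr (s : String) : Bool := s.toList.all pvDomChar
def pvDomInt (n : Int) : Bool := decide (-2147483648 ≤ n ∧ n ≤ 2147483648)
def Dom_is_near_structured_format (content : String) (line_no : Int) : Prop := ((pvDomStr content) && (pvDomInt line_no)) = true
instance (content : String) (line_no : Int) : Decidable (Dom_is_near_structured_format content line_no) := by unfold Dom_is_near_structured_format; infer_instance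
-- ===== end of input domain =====

-- B scans ALL lines once, marking "structured" lines with a minimal keyword tuple
-- (keywords subsumed by a shorter keyword, or containing an uppercase letter that a
-- lowercased line can never contain, are dropped), then tests whether any marked
-- line index falls in the raw window [line_no-11, line_no+10) — instead of A's
-- clamped index loop over the window with the full per-format keyword groups
-- (objective: alternative decomposition, not claimed faster).

-- ===== PORT A =====
-- STRUCTURED_FORMATS: module-level dict constant; A iterates .values() in insertion order.
def structuredFormats : List (String × List String) :=
  [("markdown", ["md", "markdown"]),
   ("latex", ["tex", "latex", "LaTeX"]),
   ("bibtex", ["bib", "bibtex", "BibTeX"]),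
   ("xml", ["xml", "XML"]),
   ("json", ["json", "JSON"]),
   ("yaml", ["yaml", "yml"])]

def is_near_structured_format (content : String) (line_no : Int) : Bool :=
  let lines := PySem.Str.splitlines content
  let contextRange : Int := 10
  let start := max 0 (line_no - contextRange - 1)
  let stop := min (PySem.List.len lines) (line_no + contextRange)
  -- 'for i in range(start, end): ... if any(...): return True' / final 'return False'
  (PySem.List.pyRange start stop 1).any (fun i =>
    let lineLower := PySem.Str.lower (PySem.List.pyGetD lines i "")
    (structuredFormats.map (fun kv => kv.2)).any (fun keywords =>
      keywords.any (fun keyword => PySem.Str.isIn keyword lineLower)))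

-- ===== PORT B =====
-- KEYWORDS: B's module-level minimal keyword tuple
def pvKeywords : List String := ["md", "markdown", "tex", "bib", "xml", "json", "yaml", "yml"]

-- 'any(lo <= i < hi for i, line in enumerate(content.splitlines()) if any(kw in line.lower() for kw in KEYWORDS))'
def is_near_structured_format_alt (content : String) (line_no : Int) : Bool :=
  let lo := line_no - 11
  let hi := line_no + 10
  ((PySem.List.enumerate (PySem.Str.splitlines content) 0).filter
      (fun p => pvKeywords.any (fun kw => PySem.Str.isIn kw (PySem.Str.lower p.2)))).any
    (fun p => decide (lo ≤ p.1 ∧ p.1 < hi))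

-- ===== PRECONDITION & SPEC =====
def Spec_is_near_structured_format (content : String) (line_no : Int) (out : Bool) : Prop := out = is_near_structured_format_alt content line_no
instance (content : String) (line_no : Int) (out : Bool) : Decidable (Spec_is_near_structured_format content line_no out) := by unfold Spec_is_near_structured_format; infer_instance

-- ===== CLAIM (what is proved, stated in full; the proofs are below) =====
def Claim_equal_is_near_structured_format : Prop := ∀ (content : String) (line_no : Int), Dom_is_near_structured_format content line_no → Spec_is_near_structured_format content line_no (is_near_structured_format content line_no)

-- ===== LEMMAS AND PROOFS =====

-- lowercasing never produces an uppercase ASCII letter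
theorem pv_upper_lower (c : Char) : PySem.Chars.isupper (PySem.Chars.lowerChar c) = false := by
  unfold PySem.Chars.lowerChar PySem.Chars.isupper
  split_ifs with h
  · simp only [Bool.and_eq_true, decide_eq_true_eq, Char.le_def] at h ⊢
    have h1 : 65 ≤ c.toNat := h.1
    have h2 : c.toNat ≤ 90 := h.2
    have hv : Nat.isValidChar (c.toNat + 32) := Or.inl (by omega)
    have htn : (Char.ofNat (c.toNat + 32)).val.toNat = c.toNat + 32 := by
      unfold Char.ofNat
      rw [dif_pos hv]
      rfl
    simp only [Bool.and_eq_false_iff, decide_eq_false_iff_not]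
    right
    simp only [UInt32.le_iff_toNat_le]
    have hz : 'Z'.val.toNat = 90 := by decide
    omega
  · simpa using h

-- a keyword containing an uppercase letter is never a substring of a lowercased line
theorem pv_isIn_upper_false (kw s : String) (u : Char)
    (hu : PySem.Chars.isupper u = true) (hmem : u ∈ kw.toList) :
    PySem.Str.isIn kw (PySem.Str.lower s) = false := by
  rw [← Bool.not_eq_true, PySem.Str.isIn_iff_infix, PySem.Str.toList_lower]
  intro hinf
  have hmem' : u ∈ PySem.Chars.lower s.toList := hinf.sublist.subset hmem
  have : ∃ c ∈ s.toList, PySem.Chars.lowerChar c = u := by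
    simpa [PySem.Chars.lower] using hmem'
  obtain ⟨c, _, hc⟩ := this
  rw [← hc, pv_upper_lower] at hu
  exact Bool.false_ne_true hu

-- a keyword that contains another keyword as a substring is subsumed by it
theorem pv_isIn_mono (sub kw t : String) (h : sub.toList <:+: kw.toList) :
    PySem.Str.isIn kw t = true → PySem.Str.isIn sub t = true := by
  rw [PySem.Str.isIn_iff_infix, PySem.Str.isIn_iff_infix]
  exact fun h2 => h.trans h2

-- per line: A's nested scan over the full keyword groups = B's scan of the minimal tuple
theorem pv_hit_eq (line : String) :
    ((structuredFormats.map (fun kv => kv.2)).any (fun keywords =>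
        keywords.any (fun keyword => PySem.Str.isIn keyword (PySem.Str.lower line)))) =
      pvKeywords.any (fun kw => PySem.Str.isIn kw (PySem.Str.lower line)) := by
  simp only [structuredFormats, pvKeywords, List.map_cons, List.map_nil,
    List.any_cons, List.any_nil, Bool.or_false]
  rw [pv_isIn_upper_false "LaTeX" line 'L' (by decide) (by decide)]
  rw [pv_isIn_upper_false "BibTeX" line 'B' (by decide) (by decide)]
  rw [pv_isIn_upper_false "XML" line 'X' (by decide) (by decide)]
  rw [pv_isIn_upper_false "JSON" line 'J' (by decide) (by decide)]
  simp only [Bool.or_false]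
  rw [Bool.eq_iff_iff]
  simp only [Bool.or_eq_true]
  have hlatex := pv_isIn_mono "tex" "latex" (PySem.Str.lower line) (by decide)
  have hbibtex := pv_isIn_mono "bib" "bibtex" (PySem.Str.lower line) (by decide)
  constructor
  · rintro ((h | h) | (h | h) | (h | h) | h | h | (h | h))
    · exact Or.inl h
    · exact Or.inr (Or.inl h)
    · exact Or.inr (Or.inr (Or.inl h))
    · exact Or.inr (Or.inr (Or.inl (hlatex h)))
    · exact Or.inr (Or.inr (Or.inr (Or.inl h)))
    · exact Or.inr (Or.inr (Or.inr (Or.inl (hbibtex h))))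
    · exact Or.inr (Or.inr (Or.inr (Or.inr (Or.inl h))))
    · exact Or.inr (Or.inr (Or.inr (Or.inr (Or.inr (Or.inl h)))))
    · exact Or.inr (Or.inr (Or.inr (Or.inr (Or.inr (Or.inr (Or.inl h))))))
    · exact Or.inr (Or.inr (Or.inr (Or.inr (Or.inr (Or.inr (Or.inr h))))))
  · rintro (h | h | h | h | h | h | h | h)
    · exact Or.inl (Or.inl h)
    · exact Or.inl (Or.inr h)
    · exact Or.inr (Or.inl (Or.inl h))
    · exact Or.inr (Or.inr (Or.inl (Or.inl h)))
    · exact Or.inr (Or.inr (Or.inr (Or.inl h)))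
    · exact Or.inr (Or.inr (Or.inr (Or.inr (Or.inl h))))
    · exact Or.inr (Or.inr (Or.inr (Or.inr (Or.inr (Or.inl h)))))
    · exact Or.inr (Or.inr (Or.inr (Or.inr (Or.inr (Or.inr h)))))

-- A's index loop over the window equals a direct traversal of the window slice
theorem pv_any_window {α : Type} (xs : List α) (d : α) (g : α → Bool) :
    ∀ (n : Nat) (s e : Int), (e - s).toNat = n → 0 ≤ s → e ≤ (xs.length : Int) →
      (PySem.List.pyRange s e 1).any (fun i => g (PySem.List.pyGetD xs i d)) =
        ((xs.drop s.toNat).take (e.toNat - s.toNat)).any g := by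
  intro n
  induction n with
  | zero =>
    intro s e hn hs _
    rw [PySem.List.pyRange_one_eq_nil (by omega)]
    have : e.toNat - s.toNat = 0 := by omega
    simp [this]
  | succ n ih =>
    intro s e hn hs he
    have hlt : s < e := by omega
    have hsl : s.toNat < xs.length := by omega
    rw [PySem.List.pyRange_one_cons hlt]
    rw [List.any_cons]
    rw [PySem.List.pyGetD_eq_getElem xs d hs (by omega)]
    have hdrop : xs.drop s.toNat = xs[s.toNat] :: xs.drop (s.toNat + 1) :=
      List.drop_eq_getElem_cons hsl
    have htk : e.toNat - s.toNat = (e.toNat - (s.toNat + 1)) + 1 := by omega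
    rw [hdrop, htk, List.take_succ_cons, List.any_cons]
    have := ih (s + 1) e (by omega) (by omega) he
    have hs1 : (s + 1).toNat = s.toNat + 1 := by omega
    rw [hs1] at this
    rw [this]

-- the clamped window slice hit-scan = B's enumerate/filter interval test
theorem pv_window_enum (L : List String) (g : String → Bool) (lo hi : Int) :
    ((L.drop (max 0 lo).toNat).take ((min ((L.length : Int)) hi).toNat - (max 0 lo).toNat)).any g =
      ((PySem.List.enumerate L 0).filter (fun p => g p.2)).any
        (fun p => decide (lo ≤ p.1 ∧ p.1 < hi)) := by
  rw [List.any_filter, Bool.eq_iff_iff]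
  simp only [List.any_eq_true, Bool.and_eq_true, decide_eq_true_eq,
    PySem.List.mem_enumerate_iff]
  constructor
  · rintro ⟨x, hx, hg⟩
    obtain ⟨j, hj, hxe⟩ := List.mem_iff_getElem.1 hx
    rw [List.length_take, List.length_drop] at hj
    have hjl : (max 0 lo).toNat + j < L.length := by omega
    have hxv : x = L[(max 0 lo).toNat + j] := by
      rw [← hxe, List.getElem_take, List.getElem_drop]
    refine ⟨((0 : Int) + ((max 0 lo).toNat + j : Nat), L[(max 0 lo).toNat + j]),
      ⟨(max 0 lo).toNat + j, hjl, rfl⟩, ?_, ?_, ?_⟩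
    · simpa using hxv ▸ hg
    · push_cast; omega
    · push_cast; omega
  · rintro ⟨p, ⟨k, hk, rfl⟩, hg, hlo, hhi⟩
    dsimp only at hg hlo hhi
    refine ⟨L[k], ?_, by simpa using hg⟩
    apply List.mem_iff_getElem.2
    have hks : (max 0 lo).toNat ≤ k := by omega
    have hke : k < (min ((L.length : Int)) hi).toNat := by omega
    refine ⟨k - (max 0 lo).toNat, ?_, ?_⟩
    · rw [List.length_take, List.length_drop]; omega
    · rw [List.getElem_take, List.getElem_drop]
      have hidx : (max 0 lo).toNat + (k - (max 0 lo).toNat) = k := by omega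
      simp only [hidx]

-- ===== VERDICT (by name: the statement is the Claim_ definition above) =====
theorem is_near_structured_format_spec : Claim_equal_is_near_structured_format := by
  intro content line_no _
  unfold Spec_is_near_structured_format
  unfold is_near_structured_format is_near_structured_format_alt
  simp only [PySem.List.len_eq, pv_hit_eq]
  rw [pv_any_window (PySem.Str.splitlines content) ""
        (fun line => pvKeywords.any (fun kw => PySem.Str.isIn kw (PySem.Str.lower line)))
        ((min (((PySem.Str.splitlines content).length : Int)) (line_no + 10)) -
          (max 0 (line_no - 10 - 1))).toNat
        (max 0 (line_no - 10 - 1))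
        (min (((PySem.Str.splitlines content).length : Int)) (line_no + 10))
        rfl (by omega) (by omega)]
  have h11 : max (0 : Int) (line_no - 10 - 1) = max 0 (line_no - 11) := by omega
  rw [h11]
  exact pv_window_enum (PySem.Str.splitlines content)
    (fun line => pvKeywords.any (fun kw => PySem.Str.isIn kw (PySem.Str.lower line)))
    (line_no - 11) (line_no + 10)
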